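-- pv_equiv track=rewrite | github.com/nikita1610/100PythonProblems | Problem90/Day90.py | reverse_consonants
-- ===== SOURCE A (Python) =====
-- def reverse_consonants(s):
--     l=[i for i in s]
--     n=len(l)
--     start=0
--     end=n-1
--     v=['a','e','i','o','u','A','E','I','O','U']
--     while(start<end):
--         if l[start] not in v :
--             while l[end] in v:
--                 end-=1
--             l[start],l[end]=l[end],l[start]
--             start+=1
--             end-=1
--         else:
--             start+=1
--     s1="".join(l)
--     return s1
-- ===== SOURCE B (Python) =====
-- def reverse_consonants(s):
--     vowels = set('aeiouAEIOU')
--     cons = [c for c in s if c not in vowels]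
--     res = []
--     for c in s:
--         if c in vowels:
--             res.append(c)
--         else:
--             res.append(cons.pop())
--     return ''.join(res)
-- ===== Notes on version B (the rewrite author's own statement) =====
-- stated objective: simpler
-- what changed: Replaces the in-place inward two-pointer swap loop (with an inner backward vowel-skipping scan) by a collect-then-refill scheme: gather all consonants in one pass, then rebuild the string left to right, keeping vowels and popping consonants from the end of the collected list.
import Mathlib
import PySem

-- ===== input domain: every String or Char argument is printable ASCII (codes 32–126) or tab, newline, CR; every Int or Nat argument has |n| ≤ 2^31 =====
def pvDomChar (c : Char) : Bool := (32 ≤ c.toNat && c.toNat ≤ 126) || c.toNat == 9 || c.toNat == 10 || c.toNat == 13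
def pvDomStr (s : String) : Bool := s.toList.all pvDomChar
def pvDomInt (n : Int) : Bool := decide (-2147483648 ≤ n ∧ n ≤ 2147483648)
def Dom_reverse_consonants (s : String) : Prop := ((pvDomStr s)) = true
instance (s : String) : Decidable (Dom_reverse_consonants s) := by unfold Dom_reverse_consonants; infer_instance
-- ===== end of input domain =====

-- B replaces A's in-place two-pointer swap with a collect-then-refill single forward pass (simpler decomposition, same O(n) cost).

-- ===== PORT A =====
-- v = ['a','e','i','o','u','A','E','I','O','U']
def pvVow : List Char := ['a','e','i','o','u','A','E','I','O','U']

-- inner loop `while l[end] in v: end -= 1`; indices kept as Nat (in every state A reaches,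
-- end stays ≥ start ≥ 0 and < len(l), so l.getD is exact there; the e = 0 stop is unreachable
-- below a consonant at index start)
def pvInner (l : List Char) : Nat → Nat
  | 0 => 0
  | e+1 => if pvVow.contains (l.getD (e+1) ' ') then pvInner l e else e+1

theorem pvInner_le (l : List Char) (e : Nat) : pvInner l e ≤ e := by
  induction e with
  | zero => simp [pvInner]
  | succ e ih => simp only [pvInner]; split <;> omega

-- outer loop `while start < end: ...`
def pvLoopA (l : List Char) (s e : Nat) : List Char :=
  if s < e then
    if pvVow.contains (l.getD s ' ') = false then
      pvLoopA ((l.set s (l.getD (pvInner l e) ' ')).set (pvInner l e) (l.getD s ' '))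
        (s+1) (pvInner l e - 1)
    else pvLoopA l (s+1) e
  else l
termination_by e - s
decreasing_by
  · have := pvInner_le l e; omega
  · omega

def reverse_consonants (s : String) : String :=
  String.mk (pvLoopA s.toList 0 (s.toList.length - 1))

-- ===== PORT B =====
-- vowels = set('aeiouAEIOU')
def pvVowSet : PySem.Set Char := PySem.Set.ofList "aeiouAEIOU".toList

-- `for c in s: res.append(c if vowel else cons.pop())`; cons.pop() = pop from the end
-- (the `none` branch is Python's IndexError on an empty cons — unreachable, since cons holds
-- exactly the consonants of s)
def pvLoopB (cs : List Char) (k : List Char) (res : List Char) : List Char :=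
  match cs with
  | [] => res
  | c :: t =>
    if pvVowSet.contains c then pvLoopB t k (res ++ [c])
    else
      match PySem.List.pop? k with
      | some (x, k') => pvLoopB t k' (res ++ [x])
      | none => res

def reverse_consonants_alt (s : String) : String :=
  String.mk (pvLoopB s.toList (s.toList.filter (fun c => !(pvVowSet.contains c))) [])

-- ===== PRECONDITION & SPEC =====
def Spec_reverse_consonants (s : String) (out : String) : Prop := out = reverse_consonants_alt s
instance (s : String) (out : String) : Decidable (Spec_reverse_consonants s out) := by unfold Spec_reverse_consonants; infer_instance

-- ===== CLAIM (what is proved, stated in full; the proofs are below) =====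
def Claim_equal_reverse_consonants : Prop := ∀ (s : String), Dom_reverse_consonants s → Spec_reverse_consonants s (reverse_consonants s)

-- ===== LEMMAS AND PROOFS =====

def isV (c : Char) : Bool := pvVow.contains c

theorem vowSet_eq (c : Char) : pvVowSet.contains c = isV c := by
  rw [show pvVowSet = (pvVow : PySem.Set Char) from by decide]; rfl

-- split r into (m, b, vs): b the LAST consonant of r, vs the all-vowel tail
def splitLast : List Char → Option (List Char × Char × List Char)
  | [] => none
  | c :: t =>
    match splitLast t with
    | some (m, b, vs) => some (c :: m, b, vs)
    | none => if isV c then none else some ([], c, t)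

theorem splitLast_none {r : List Char} (h : splitLast r = none) :
    ∀ c ∈ r, isV c = true := by
  induction r with
  | nil => simp
  | cons c t ih =>
    intro x hx
    simp only [splitLast] at h
    rcases hs : splitLast t with _ | ⟨m, b, vs⟩
    · rw [hs] at h
      by_cases hv : isV c = true
      · rcases List.mem_cons.mp hx with rfl | hx'
        · exact hv
        · exact ih hs x hx'
      · simp [hv] at h
    · rw [hs] at h; simp at h

theorem splitLast_some {r m vs : List Char} {b : Char}
    (h : splitLast r = some (m, b, vs)) :
    r = m ++ b :: vs ∧ isV b = false ∧ (∀ c ∈ vs, isV c = true) := by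
  induction r generalizing m with
  | nil => simp [splitLast] at h
  | cons c t ih =>
    simp only [splitLast] at h
    rcases hs : splitLast t with _ | ⟨m', b', vs'⟩
    · rw [hs] at h
      by_cases hv : isV c = true
      · simp [hv] at h
      · rw [if_neg hv] at h
        simp only [Option.some.injEq, Prod.mk.injEq] at h
        obtain ⟨rfl, rfl, rfl⟩ := h
        exact ⟨rfl, by simpa using hv, splitLast_none hs⟩
    · rw [hs] at h
      simp only [Option.some.injEq, Prod.mk.injEq] at h
      obtain ⟨rfl, rfl, rfl⟩ := h
      obtain ⟨h1, h2, h3⟩ := ih hs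
      exact ⟨by rw [h1]; simp, h2, h3⟩

theorem splitLast_length_lt {r m vs : List Char} {b : Char}
    (h : splitLast r = some (m, b, vs)) : m.length < r.length := by
  have := (splitLast_some h).1; subst this; simp

-- the list-level two-pointer: what A's loop computes on the untouched middle segment
def F : List Char → List Char
  | [] => []
  | a :: r =>
    if isV a then a :: F r
    else
      match h : splitLast r with
      | none => a :: r
      | some (m, b, vs) => b :: (F m ++ a :: vs)
termination_by l => l.length
decreasing_by
  · simp
  · have := splitLast_length_lt h; simp; omega

theorem F_nil : F [] = [] := by rw [F]

theorem F_cons_vowel {a : Char} {r : List Char} (hv : isV a = true) :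
    F (a :: r) = a :: F r := by rw [F, if_pos hv]

theorem F_cons_none {a : Char} {r : List Char} (hv : ¬ isV a = true)
    (hs : splitLast r = none) : F (a :: r) = a :: r := by
  rw [F, if_neg hv]
  split
  · rfl
  · rename_i m b vs heq; rw [hs] at heq; cases heq

theorem F_cons_some {a b : Char} {r m vs : List Char} (hv : ¬ isV a = true)
    (hs : splitLast r = some (m, b, vs)) : F (a :: r) = b :: (F m ++ a :: vs) := by
  rw [F, if_neg hv]
  split
  · rename_i heq; rw [hs] at heq; cases heq
  · rename_i m' b' vs' heq
    rw [hs] at heq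
    simp only [Option.some.injEq, Prod.mk.injEq] at heq
    obtain ⟨rfl, rfl, rfl⟩ := heq
    rfl

-- what B computes: keep vowels, consume the given consonant supply from the front
def refill : List Char → List Char → List Char
  | [], _ => []
  | c :: t, cs =>
    if isV c then c :: refill t cs
    else
      match cs with
      | [] => c :: refill t []
      | x :: cs' => x :: refill t cs'

theorem refill_nil (cs : List Char) : refill [] cs = [] := rfl

theorem refill_cons_vowel {c : Char} (t cs : List Char) (hv : isV c = true) :
    refill (c :: t) cs = c :: refill t cs := by
  rw [refill.eq_def]; simp [hv]

theorem refill_cons_cons {c : Char} (t : List Char) (x : Char) (cs : List Char)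
    (hv : isV c = false) : refill (c :: t) (x :: cs) = x :: refill t cs := by
  rw [refill.eq_def]; simp [hv]

theorem filter_vowels_nil {vs : List Char} (h : ∀ c ∈ vs, isV c = true) :
    vs.filter (fun c => !isV c) = [] :=
  List.filter_eq_nil_iff.mpr (fun c hc => by simp [h c hc])

theorem refill_vowels {xs : List Char} (h : ∀ c ∈ xs, isV c = true) (cs : List Char) :
    refill xs cs = xs := by
  induction xs with
  | nil => rfl
  | cons c t ih =>
    rw [refill_cons_vowel _ _ (h c List.mem_cons_self),
        ih (fun x hx => h x (List.mem_cons_of_mem c hx))]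

theorem refill_append {xs cs1 : List Char} (ys cs2 : List Char)
    (h : (xs.filter (fun c => !isV c)).length = cs1.length) :
    refill (xs ++ ys) (cs1 ++ cs2) = refill xs cs1 ++ refill ys cs2 := by
  induction xs generalizing cs1 with
  | nil =>
    obtain rfl : cs1 = [] := List.length_eq_zero_iff.mp h.symm
    simp [refill_nil]
  | cons c t ih =>
    by_cases hv : isV c = true
    · rw [List.cons_append, refill_cons_vowel _ _ hv, refill_cons_vowel _ _ hv,
        ih (by simpa [hv] using h), List.cons_append]
    · have hv' : isV c = false := by simpa using hv
      rcases cs1 with _ | ⟨x, cs1'⟩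
      · simp [hv] at h
      · rw [List.cons_append, List.cons_append, refill_cons_cons _ _ _ hv',
          refill_cons_cons _ _ _ hv', ih (by simpa [hv] using h), List.cons_append]

theorem F_eq_refill (l : List Char) :
    F l = refill l ((l.filter (fun c => !isV c)).reverse) := by
  induction hn : l.length using Nat.strong_induction_on generalizing l with
  | _ n ih =>
  rcases l with _ | ⟨a, r⟩
  · simp [F, refill_nil]
  · by_cases hv : isV a = true
    · rw [F_cons_vowel hv]
      have hfil : (a :: r).filter (fun c => !isV c) = r.filter (fun c => !isV c) := by
        simp [hv]
      rw [hfil, refill_cons_vowel _ _ hv, ih r.length (by simp [← hn]) r rfl]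
    · have hv' : isV a = false := by simpa using hv
      rcases hs : splitLast r with _ | ⟨m, b, vs⟩
      · have hall := splitLast_none hs
        rw [F_cons_none hv hs]
        have hfil : (a :: r).filter (fun c => !isV c) = [a] := by
          simp [hv', filter_vowels_nil hall]
        rw [hfil, List.reverse_singleton, refill_cons_cons _ _ _ hv',
          refill_vowels hall]
      · obtain ⟨rfl, hb, hvs⟩ := splitLast_some hs
        rw [F_cons_some hv hs]
        have hfil : (a :: (m ++ b :: vs)).filter (fun c => !isV c)
            = a :: ((m.filter (fun c => !isV c)) ++ [b]) := by
          simp [hv', hb, filter_vowels_nil hvs]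
        rw [hfil]
        have hrev : (a :: ((m.filter (fun c => !isV c)) ++ [b])).reverse
            = b :: ((m.filter (fun c => !isV c)).reverse ++ [a]) := by simp
        rw [hrev, refill_cons_cons _ _ _ hv',
          refill_append _ _ (by simp),
          refill_cons_cons _ _ _ hb, refill_vowels hvs,
          ih m.length (by subst hn; simp only [List.length_append, List.length_cons, List.length_nil]; omega) m rfl]

theorem loopB_eq (cs : List Char) : ∀ (k res : List Char),
    (cs.filter (fun c => !isV c)).length = k.length →
    pvLoopB cs k res = res ++ refill cs k.reverse := by
  induction cs with
  | nil => intro k res h; simp [pvLoopB, refill_nil]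
  | cons c t ih =>
    intro k res h
    by_cases hv : isV c = true
    · rw [pvLoopB, if_pos (by rw [vowSet_eq]; exact hv)]
      rw [ih k (res ++ [c]) (by simpa [hv] using h), refill_cons_vowel _ _ hv]
      simp
    · rcases k.eq_nil_or_concat with rfl | ⟨k₀, x, rfl⟩
      · simp [List.filter_cons, hv] at h
      · rw [pvLoopB, if_neg (by rw [vowSet_eq]; simp [hv])]
        simp only [List.concat_eq_append, PySem.List.pop?_last]
        rw [ih k₀ (res ++ [x]) (by simpa [hv] using h)]
        rw [show (k₀ ++ [x]).reverse = x :: k₀.reverse from by simp,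
          refill_cons_cons _ _ _ (by simpa using hv)]
        simp

-- A-side: characterise the inner scan
theorem inner_spec (l : List Char) (i : Nat) : ∀ (e : Nat), i ≤ e →
    isV (l.getD i ' ') = false →
    (∀ k, i < k → k ≤ e → isV (l.getD k ' ') = true) →
    pvInner l e = i := by
  intro e
  induction e with
  | zero =>
    intro h _ _
    obtain rfl : i = 0 := by omega
    rfl
  | succ e ihe =>
    intro hie hi hk
    rcases Nat.lt_or_ge i (e+1) with hlt | hge
    · rw [pvInner, if_pos (show pvVow.contains (l.getD (e+1) ' ') = true from
        hk (e+1) hlt (le_refl _))]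
      exact ihe (by omega) hi (fun k h1 h2 => hk k h1 (by omega))
    · have : i = e + 1 := by omega
      subst this
      rw [pvInner, if_neg (by simpa [isV] using hi)]

theorem F_short {M : List Char} (h : M.length < 2) : F M = M := by
  rcases M with _ | ⟨a, r⟩
  · exact F_nil
  · rcases r with _ | ⟨b, t⟩
    · by_cases hv : isV a = true
      · rw [F_cons_vowel hv, F_nil]
      · rw [F_cons_none hv rfl]
    · simp at h

-- the main bridge: A's loop on P ++ M ++ S with start = |P|, end = |P|+|M|-1 leaves P and S
-- alone and performs the two-pointer reversal F on the middle M
theorem loopA_decomp (M : List Char) : ∀ (P S : List Char),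
    pvLoopA (P ++ M ++ S) P.length (P.length + M.length - 1) = P ++ F M ++ S := by
  induction hn : M.length using Nat.strong_induction_on generalizing M with
  | _ n ih =>
  intro P S
  subst hn
  by_cases hlen : M.length < 2
  · rw [pvLoopA, if_neg (by omega), F_short hlen]
  · rcases M with _ | ⟨a, r⟩
    · simp at hlen
    · have hr : r ≠ [] := by rintro rfl; simp at hlen
      have hga : (P ++ (a :: r) ++ S).getD P.length ' ' = a := by
        rw [List.append_assoc, List.getD_append_right _ _ _ _ (le_refl _)]
        simp
      rw [pvLoopA, if_pos (by have := List.length_pos_of_ne_nil hr; simp only [List.length_append, List.length_cons, List.length_nil]; omega)]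
      by_cases hv : isV a = true
      · rw [if_neg (by rw [hga]; simpa [isV] using hv)]
        have happ : P ++ (a :: r) ++ S = (P ++ [a]) ++ r ++ S := by simp
        have hlen2 : P.length + (a :: r).length - 1 = (P ++ [a]).length + r.length - 1 := by
          simp only [List.length_append, List.length_cons, List.length_nil]; omega
        rw [happ, hlen2, show P.length + 1 = (P ++ [a]).length by simp]
        rw [ih r.length (by simp) r rfl (P ++ [a]) S, F_cons_vowel hv]
        simp
      · rw [if_pos (by rw [hga]; simpa [isV] using hv)]
        rcases hs : splitLast r with _ | ⟨m, b, vs⟩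
        · -- r is all vowels: inner scan comes all the way down to start; swap is a no-op
          have hall := splitLast_none hs
          have he' : pvInner (P ++ (a :: r) ++ S) (P.length + (a :: r).length - 1) = P.length := by
            apply inner_spec
            · simp only [List.length_append, List.length_cons, List.length_nil]; omega
            · rw [hga]; simpa [isV] using hv
            · intro k h1 h2
              have hk1 : k - P.length - 1 < r.length := by
                have := List.length_pos_of_ne_nil hr
                simp only [List.length_append, List.length_cons, List.length_nil] at h2; omega
              have : (P ++ (a :: r) ++ S).getD k ' ' = r.getD (k - P.length - 1) ' ' := by
                rw [List.append_assoc, List.getD_append_right _ _ _ _ (by omega)]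
                rcases Nat.exists_eq_add_of_lt h1 with ⟨j, hj⟩
                have : k - P.length = j + 1 := by omega
                rw [this, List.cons_append, List.getD_cons_succ]
                rw [List.getD_append _ _ _ _ (by omega)]
                simp
              rw [this, List.getD_eq_getElem _ _ hk1]
              exact hall _ (List.getElem_mem hk1)
          rw [he', hga]
          have hidem : ((P ++ (a :: r) ++ S).set P.length a).set P.length a
              = P ++ (a :: r) ++ S := by
            rw [List.set_set, List.append_assoc, List.set_append, if_neg (by omega)]
            simp
          rw [hidem]
          rw [pvLoopA, if_neg (by omega)]
          rw [F_cons_none hv hs]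
        · -- r = m ++ b :: vs, b the last consonant: swap a and b, recurse on m
          obtain ⟨rfl, hb, hvs⟩ := splitLast_some hs
          have hassoc : P ++ (a :: (m ++ b :: vs)) ++ S
              = (P ++ a :: m) ++ b :: (vs ++ S) := by simp
          have hgb : (P ++ (a :: (m ++ b :: vs)) ++ S).getD (P.length + 1 + m.length) ' ' = b := by
            rw [hassoc, List.getD_append_right _ _ _ _ (by simp only [List.length_append, List.length_cons, List.length_nil]; omega),
              show P.length + 1 + m.length - (P ++ a :: m).length = 0 from by simp only [List.length_append, List.length_cons, List.length_nil]; omega]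
            rfl
          have he' : pvInner (P ++ (a :: (m ++ b :: vs)) ++ S)
              (P.length + (a :: (m ++ b :: vs)).length - 1) = P.length + 1 + m.length := by
            apply inner_spec
            · simp only [List.length_append, List.length_cons, List.length_nil]; omega
            · rw [hgb]; simpa [isV] using hb
            · intro k h1 h2
              have hk1 : k - (P.length + 1 + m.length) - 1 < vs.length := by
                simp only [List.length_append, List.length_cons, List.length_nil] at h2; omega
              have : (P ++ (a :: (m ++ b :: vs)) ++ S).getD k ' '
                  = vs.getD (k - (P.length + 1 + m.length) - 1) ' ' := by
                rw [hassoc, List.getD_append_right _ _ _ _ (by simp only [List.length_append, List.length_cons, List.length_nil]; omega)]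
                have hk2 : k - (P ++ a :: m).length = (k - (P.length + 1 + m.length) - 1) + 1 := by
                  simp only [List.length_append, List.length_cons, List.length_nil]; omega
                rw [hk2, List.getD_cons_succ, List.getD_append _ _ _ _ (by omega)]
              rw [this, List.getD_eq_getElem _ _ hk1]
              exact hvs _ (List.getElem_mem hk1)
          rw [he', hga, hgb]
          have hset1 : (P ++ (a :: (m ++ b :: vs)) ++ S).set P.length b
              = P ++ (b :: (m ++ b :: vs)) ++ S := by
            rw [List.append_assoc, List.set_append, if_neg (by omega)]
            simp
          have hset2 : (P ++ (b :: (m ++ b :: vs)) ++ S).set (P.length + 1 + m.length) a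
              = (P ++ [b]) ++ m ++ (a :: (vs ++ S)) := by
            rw [show P ++ (b :: (m ++ b :: vs)) ++ S = (P ++ b :: m) ++ (b :: (vs ++ S)) from by
                simp,
              List.set_append, if_neg (by simp only [List.length_append, List.length_cons, List.length_nil]; omega),
              show P.length + 1 + m.length - (P ++ b :: m).length = 0 from by simp only [List.length_append, List.length_cons, List.length_nil]; omega,
              List.set_cons_zero]
            simp
          rw [hset1, hset2,
            show P.length + 1 + m.length - 1 = (P ++ [b]).length + m.length - 1 from by
              simp only [List.length_append, List.length_cons, List.length_nil],
            show P.length + 1 = (P ++ [b]).length from by simp]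
          rw [ih m.length (by simp only [List.length_append, List.length_cons, List.length_nil]; omega) m rfl (P ++ [b]) (a :: (vs ++ S))]
          rw [F_cons_some hv hs]
          simp

theorem loopA_eq_F (l : List Char) : pvLoopA l 0 (l.length - 1) = F l := by
  have := loopA_decomp l [] []
  simpa using this

-- ===== VERDICT (by name: the statement is the Claim_ definition above) =====
theorem reverse_consonants_spec : Claim_equal_reverse_consonants := by
  intro s _
  show reverse_consonants s = reverse_consonants_alt s
  unfold reverse_consonants reverse_consonants_alt
  rw [loopA_eq_F, F_eq_refill]
  have hfil : s.toList.filter (fun c => !(pvVowSet.contains c))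
      = s.toList.filter (fun c => !isV c) := by
    apply List.filter_congr; intro c _; rw [vowSet_eq]
  rw [loopB_eq _ _ _ (by rw [hfil]), hfil]
  simp
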